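-- pv_equiv track=rewrite | github.com/ichikawa85/lol-sim | modules/get-data/plot_fig_ap.py | w_damage
-- ===== SOURCE A (Python) =====
-- def w_damage(lv):
--     skill_level=0
--     get_w_level=[1,8,10,12,13]
--     w_damage_list = [90,135,180,225,270]
--     for level in get_w_level:
--         if lv >= level:
--             skill_level+=1
--
--     if skill_level == 0:
--         return 0
--     else:
--         return w_damage_list[skill_level-1]
-- ===== SOURCE B (Python) =====
-- def w_damage(lv):
--     if lv >= 13:
--         return 270
--     elif lv >= 12:
--         return 225
--     elif lv >= 10:
--         return 180
--     elif lv >= 8: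
--         return 135
--     elif lv >= 1:
--         return 90
--     else:
--         return 0
-- ===== Notes on version B (the rewrite author's own statement) =====
-- stated objective: simpler
-- what changed: Replaced the counting loop over a threshold list plus an indexed lookup into a parallel damage list by a direct descending if/elif ladder mapping level to damage with no maintained state or lists.
import Mathlib
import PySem

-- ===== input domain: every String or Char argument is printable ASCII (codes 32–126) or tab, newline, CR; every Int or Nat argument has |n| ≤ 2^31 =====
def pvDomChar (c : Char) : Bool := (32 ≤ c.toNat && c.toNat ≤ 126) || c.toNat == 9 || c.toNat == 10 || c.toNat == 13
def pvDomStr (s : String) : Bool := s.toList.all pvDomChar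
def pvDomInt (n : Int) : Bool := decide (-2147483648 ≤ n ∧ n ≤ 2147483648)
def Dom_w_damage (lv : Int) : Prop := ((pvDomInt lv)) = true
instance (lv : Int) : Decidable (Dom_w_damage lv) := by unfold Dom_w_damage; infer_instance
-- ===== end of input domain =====

-- B replaces the counting loop + list index by a direct if/elif ladder (simpler, stateless).


-- ===== PORT A =====
-- literal transliteration of A: count thresholds met, then index the damage list
def w_damage (lv : Int) : Int :=
  let get_w_level : List Int := [1, 8, 10, 12, 13]
  let w_damage_list : List Int := [90, 135, 180, 225, 270]
  let skill_level : Int :=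
    get_w_level.foldl (fun acc level => if lv ≥ level then acc + 1 else acc) 0
  if skill_level = 0 then 0
  else (PySem.List.pyGet? w_damage_list (skill_level - 1)).getD 0
  -- pyGet? is none exactly where Python raises IndexError; here skill_level ∈ 1..5 when ≠ 0, so the index is always valid and .getD 0 is never taken

-- ===== PORT B =====
-- B: direct descending decision ladder, no lists, no counter
def w_damage_alt (lv : Int) : Int :=
  if lv ≥ 13 then 270
  else if lv ≥ 12 then 225
  else if lv ≥ 10 then 180
  else if lv ≥ 8 then 135
  else if lv ≥ 1 then 90
  else 0

-- ===== PRECONDITION & SPEC =====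
def Spec_w_damage (lv : Int) (out : Int) : Prop := out = w_damage_alt lv
instance (lv : Int) (out : Int) : Decidable (Spec_w_damage lv out) := by unfold Spec_w_damage; infer_instance

-- ===== CLAIM (what is proved, stated in full; the proofs are below) =====
def Claim_equal_w_damage : Prop := ∀ (lv : Int), Dom_w_damage lv → Spec_w_damage lv (w_damage lv)

-- ===== LEMMAS AND PROOFS =====

-- ===== VERDICT (by name: the statement is the Claim_ definition above) =====
theorem w_damage_spec : Claim_equal_w_damage := by
  intro lv _
  unfold Spec_w_damage w_damage w_damage_alt
  simp only [List.foldl]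
  split_ifs <;> first
    | rfl
    | omega
    | (norm_num [PySem.List.pyGet?, PySem.List.pyIdx?]; omega)
    | norm_num [PySem.List.pyGet?, PySem.List.pyIdx?]
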